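-- pv_equiv track=rewrite | github.com/Mdwiki-TD/med_views | src/stats_bot.py | sum_all_views_new
-- ===== SOURCE A (Python) =====
-- def sum_all_views_new(new_data):
--     views = {}
--     for x in new_data.values():
--         for k, v in x.items():
--             views[k] = views.get(k, 0) + v
--
--     views = dict(sorted(views.items(), key=lambda item: item[0], reverse=False))
--
--     # remove any key < 2015 and not = "all"
--     views = {k: v for k, v in views.items() if (k.isnumeric() and int(k) >= 2015) or k == "all" or v > 0}
--
--     return views
-- ===== SOURCE B (Python) =====
-- def sum_all_views_new(new_data):
--     # Flatten all inner (key, value) pairs, sort by key, then combine consecutive equal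
--     # keys in one grouped pass, filtering as each group closes.
--     flat = sorted(((k, v) for x in new_data.values() for k, v in x.items()),
--                   key=lambda p: p[0])
--     result = {}
--     i, n = 0, len(flat)
--     while i < n:
--         k, total = flat[i]
--         i += 1
--         while i < n and flat[i][0] == k:
--             total += flat[i][1]
--             i += 1
--         if (k.isnumeric() and int(k) >= 2015) or k == "all" or total > 0:
--             result[k] = total
--     return result
-- ===== Notes on version B (the rewrite author's own statement) =====
-- stated objective: alternative
-- what changed: Replaces A's incremental dict accumulation followed by a sort of the finished dict's items with a sort-then-group pass: all inner (key, value) pairs are flattened into one list, sorted by key, and consecutive equal keys are combined in a single grouped scan that applies the filter as each group closes.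
import Mathlib
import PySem

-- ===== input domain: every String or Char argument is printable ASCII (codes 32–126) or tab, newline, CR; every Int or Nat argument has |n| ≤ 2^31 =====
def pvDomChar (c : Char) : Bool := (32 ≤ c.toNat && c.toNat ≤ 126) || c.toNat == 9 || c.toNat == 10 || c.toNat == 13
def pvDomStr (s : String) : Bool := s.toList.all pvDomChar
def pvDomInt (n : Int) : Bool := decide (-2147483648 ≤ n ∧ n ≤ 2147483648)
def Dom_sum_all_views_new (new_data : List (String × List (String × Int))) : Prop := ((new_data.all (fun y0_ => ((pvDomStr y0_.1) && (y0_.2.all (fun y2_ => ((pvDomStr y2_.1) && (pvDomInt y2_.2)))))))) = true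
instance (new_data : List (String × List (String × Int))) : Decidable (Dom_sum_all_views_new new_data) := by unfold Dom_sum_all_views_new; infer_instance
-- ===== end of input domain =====

-- B aggregates by scanning a flattened pair list once per sorted distinct key instead of A's
-- incremental dict build + sort of the finished dict; same return value (alternative decomposition).

-- shared filter predicate: (k.isnumeric() and int(k) >= 2015) or k == "all" or v > 0
-- (on the ASCII domain isnumeric = isdigit, and int(k) is defined whenever it is tested)
def pvKeep (k : String) (v : Int) : Bool :=
  (PySem.Str.strIsdigit k && decide (2015 ≤ (PySem.Int.ofStr? k).getD 0)) || k == "all" || decide (0 < v)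

-- ===== PORT A =====
-- views = {}; for x in new_data.values(): for k, v in x.items(): views[k] = views.get(k, 0) + v
-- then views = dict(sorted(views.items(), key=lambda item: item[0], reverse=False))
-- then views = {k: v for k, v in views.items() if (k.isnumeric() and int(k) >= 2015) or k == "all" or v > 0}
def sum_all_views_new (new_data : List (String × List (String × Int))) : List (String × Int) :=
  (PySem.Dict.ofList
    ((PySem.Dict.ofList
      (PySem.List.sorted
        ((PySem.Dict.ofList new_data).values.foldl
          (fun d x => (PySem.Dict.ofList x).items.foldl
            (fun d p => d.insert p.1 (d.getD p.1 0 + p.2)) d)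
          PySem.Dict.empty).items
        (fun p => p.1))).items.filter (fun p => pvKeep p.1 p.2))).items

-- ===== PORT B =====
-- flat = sorted(((k, v) for x in new_data.values() for k, v in x.items()), key=lambda p: p[0])
def pvFlat (new_data : List (String × List (String × Int))) : List (String × Int) :=
  ((PySem.Dict.ofList new_data).values.map (fun x => (PySem.Dict.ofList x).items)).flatten

-- the grouped scan: take one key's run of consecutive equal keys, sum it, filter, move on
-- (the index-based while loops of Source B, expressed as consume-the-run recursion)
def pvGroup (flat : List (String × Int)) : List (String × Int) :=
  match flat with
  | [] => []
  | (k, v) :: rest =>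
    let total := v + ((rest.takeWhile (fun p => p.1 == k)).map (fun p => p.2)).sum
    (if pvKeep k total then [(k, total)] else []) ++ pvGroup (rest.dropWhile (fun p => p.1 == k))
termination_by flat.length
decreasing_by
  simp only [List.length_cons]
  exact Nat.lt_succ_of_le (List.dropWhile_sublist _).length_le

def sum_all_views_new_alt (new_data : List (String × List (String × Int))) : List (String × Int) :=
  pvGroup (PySem.List.sorted (pvFlat new_data) (fun p => p.1))

-- ===== PRECONDITION & SPEC =====
def Spec_sum_all_views_new (new_data : List (String × List (String × Int))) (out : List (String × Int)) : Prop := out = sum_all_views_new_alt new_data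
instance (new_data : List (String × List (String × Int))) (out : List (String × Int)) : Decidable (Spec_sum_all_views_new new_data out) := by unfold Spec_sum_all_views_new; infer_instance

-- ===== CLAIM (what is proved, stated in full; the proofs are below) =====
def Claim_equal_sum_all_views_new : Prop := ∀ (new_data : List (String × List (String × Int))), Dom_sum_all_views_new new_data → Spec_sum_all_views_new new_data (sum_all_views_new new_data)

-- ===== LEMMAS AND PROOFS =====

-- value of A's dict after one inner loop: old value plus the sum of this list's matching values
theorem pv_getD_inner (l : List (String × Int)) (d : PySem.Dict String Int) (k : String) :
    (l.foldl (fun d p => d.insert p.1 (d.getD p.1 0 + p.2)) d).getD k 0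
      = d.getD k 0 + ((l.filter (fun p => p.1 == k)).map (fun p => p.2)).sum := by
  induction l generalizing d with
  | nil => simp
  | cons p l ih =>
    simp only [List.foldl_cons, ih, List.filter_cons]
    by_cases h : p.1 = k
    · subst h
      simp [PySem.Dict.getD_insert_self]
      ring
    · simp [PySem.Dict.getD_insert, Ne.symm h, (by simpa using h : (p.1 == k) = false)]

-- value after A's whole nested loop: sum over the flattened pair list
theorem pv_getD_outer (L : List (List (String × Int))) (d : PySem.Dict String Int) (k : String) :
    (L.foldl (fun d x => x.foldl (fun d p => d.insert p.1 (d.getD p.1 0 + p.2)) d) d).getD k 0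
      = d.getD k 0 + ((L.flatten.filter (fun p => p.1 == k)).map (fun p => p.2)).sum := by
  induction L generalizing d with
  | nil => simp
  | cons x L ih =>
    simp only [List.foldl_cons, ih, pv_getD_inner, List.flatten_cons, List.filter_append,
      List.map_append, List.sum_append]
    ring

-- keys after A's whole nested loop: the distinct keys of the flattened list, first-seen order
theorem pv_keys_outer (L : List (List (String × Int))) (d : PySem.Dict String Int) :
    (L.foldl (fun d x => x.foldl (fun d p => d.insert p.1 (d.getD p.1 0 + p.2)) d) d).keys
      = PySem.Set.update d.keys (L.flatten.map (fun p => p.1)) := by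
  induction L generalizing d with
  | nil => simp [PySem.Set.update_nil]
  | cons x L ih =>
    simp only [List.foldl_cons, ih, List.flatten_cons, List.map_append, PySem.Set.update_append]
    congr 1
    exact PySem.Dict.keys_foldl_insert_key x (fun p => p.1) (fun d p => d.getD p.1 0 + p.2) d

theorem pv_nodup_keys_outer (L : List (List (String × Int))) (d : PySem.Dict String Int)
    (h : d.keys.Nodup) :
    (L.foldl (fun d x => x.foldl (fun d p => d.insert p.1 (d.getD p.1 0 + p.2)) d) d).keys.Nodup := by
  induction L generalizing d with
  | nil => exact h
  | cons x L ih =>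
    exact ih _ (PySem.Dict.nodup_keys_foldl_insert_key x (fun p => p.1)
      (fun d p => d.getD p.1 0 + p.2) d h)

-- ofList of a list with pairwise-distinct keys keeps the items list unchanged
theorem pv_items_ofList (l : List (String × Int)) (h : (l.map (fun p => p.1)).Nodup) :
    (PySem.Dict.ofList l).items = l := by
  have : (PySem.Dict.ofList l) = l.foldl (fun d p => d.insert p.1 p.2) PySem.Dict.empty := rfl
  rw [this]
  have := PySem.Dict.items_foldl_insert_fresh (l := l) (k := fun p => p.1) (v := fun p => p.2)
    (d := PySem.Dict.empty) (by intro a _; simp) h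
  simpa using this

-- Set.discard is a filter, so discarding an absent element is a no-op
theorem pv_discard_not_mem (s : PySem.Set String) (x : String) (h : x ∉ s) :
    s.discard x = s := by
  show s.filter (fun y => !(y == x)) = s
  rw [List.filter_eq_self]
  intro a ha
  simp only [Bool.not_eq_eq_eq_not, Bool.not_true, beq_eq_false_iff_ne]
  exact fun he => h (he ▸ ha)

-- ofList of "a block of copies of k, then a k-free tail": discarding k leaves ofList of the tail
theorem pv_ofList_run (A B : List String) (k : String) (hA : ∀ a ∈ A, a = k) (hB : k ∉ B) :
    (PySem.Set.ofList (A ++ B)).discard k = PySem.Set.ofList B := by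
  have hBk : k ∉ PySem.Set.ofList B := fun h => hB ((PySem.Set.mem_ofList _ _).mp h)
  induction A with
  | nil => simpa using pv_discard_not_mem _ _ hBk
  | cons a A ih =>
    have hak : a = k := hA a (by simp)
    subst hak
    rw [List.cons_append, PySem.Set.ofList_cons, ih (fun a ha => hA a (by simp [ha]))]
    show (a :: PySem.Set.ofList B).filter (fun y => !(y == a)) = _
    rw [List.filter_cons, if_neg (by simp)]
    apply List.filter_eq_self.mpr
    intro y hy
    simp only [Bool.not_eq_eq_eq_not, Bool.not_true, beq_eq_false_iff_ne]
    exact fun he => hBk (he ▸ hy)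

-- deduplication (first occurrences) of a ≤-ordered list is still ≤-ordered
theorem pv_pairwise_ofList (xs : List String) (h : xs.Pairwise (· ≤ ·)) :
    (PySem.Set.ofList xs).Pairwise (· ≤ ·) := by
  induction xs using List.reverseRecOn with
  | nil => simp [PySem.Set.ofList]
  | append_singleton ys y ih =>
    rw [PySem.Set.ofList_append_singleton, PySem.Set.add_eq_ite]
    have h' := List.pairwise_append.mp h
    split_ifs
    · exact ih h'.1
    · rw [List.pairwise_append]
      refine ⟨ih h'.1, List.pairwise_singleton _ _, ?_⟩
      intro a ha b hb
      simp only [List.mem_singleton] at hb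
      subst hb
      exact h'.2.2 a ((PySem.Set.mem_ofList _ _).mp ha) b (by simp)

-- the head dropped into by dropWhile fails the predicate
theorem pv_dropWhile_head_false {α : Type} (q : α → Bool) (l : List α) (d : α) (t : List α)
    (h : l.dropWhile q = d :: t) : q d = false := by
  induction l with
  | nil => simp at h
  | cons a l ih =>
    rw [List.dropWhile_cons] at h
    split at h
    · exact ih h
    · next hq =>
      cases h
      simpa using hq

-- the grouped scan over a key-ordered list is the filtered per-key sum table,
-- keyed by the distinct keys in their (already sorted) first-occurrence order
theorem pv_pvGroup_eq (l : List (String × Int)) (h : l.Pairwise (fun a b => a.1 ≤ b.1)) :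
    pvGroup l = ((PySem.Set.ofList (l.map (fun p => p.1))).map
        (fun k => (k, ((l.filter (fun p => p.1 == k)).map (fun p => p.2)).sum))).filter
        (fun p => pvKeep p.1 p.2) := by
  induction l using pvGroup.induct with
  | case1 => simp [pvGroup, PySem.Set.ofList]
  | case2 k v rest ih =>
    -- names: the run and the remainder
    set run := rest.takeWhile (fun p => p.1 == k) with hrunDef
    set rest' := rest.dropWhile (fun p => p.1 == k) with hrest'Def
    have hsplit : run ++ rest' = rest := List.takeWhile_append_dropWhile
    have hpw_rest : rest.Pairwise (fun a b => a.1 ≤ b.1) := (List.pairwise_cons.mp h).2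
    have hle : ∀ p ∈ rest, k ≤ p.1 := (List.pairwise_cons.mp h).1
    have hrun : ∀ p ∈ run, p.1 = k := by
      intro p hp
      simpa using List.mem_takeWhile_imp hp
    have hpw_rest' : rest'.Pairwise (fun a b => a.1 ≤ b.1) :=
      List.Pairwise.sublist (List.dropWhile_sublist _) hpw_rest
    have hrest' : ∀ p ∈ rest', p.1 ≠ k := by
      cases hrd : rest' with
      | nil => intro p hp; simp at hp
      | cons d t =>
        have hdk' : d.1 ≠ k := by
          have := pv_dropWhile_head_false (fun p => p.1 == k) rest d t
            (by rw [← hrest'Def]; exact hrd)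
          simpa using this
        have hdmem : d ∈ rest := (List.dropWhile_sublist _).mem
          (by rw [← hrest'Def, hrd]; simp)
        intro p hp
        rcases List.mem_cons.mp hp with rfl | hpt
        · exact hdk'
        · intro hpk
          have hpw2 : (d :: t).Pairwise (fun a b => a.1 ≤ b.1) := hrd ▸ hpw_rest'
          have h1 : d.1 ≤ p.1 := (List.pairwise_cons.mp hpw2).1 p hpt
          have h2 : k ≤ d.1 := hle d hdmem
          exact hdk' (le_antisymm (hpk ▸ h1) h2)
    -- the filter at key k is exactly (k,v) :: run
    have hfilk : ((k, v) :: rest).filter (fun p => p.1 == k) = (k, v) :: run := by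
      rw [List.filter_cons, if_pos (by simp)]
      congr 1
      rw [← hsplit, List.filter_append]
      rw [List.filter_eq_self.mpr (fun p hp => by simp [hrun p hp]),
        List.filter_eq_nil_iff.mpr (fun p hp => by simpa using hrest' p hp), List.append_nil]
    -- the distinct keys: k then the distinct keys of rest'
    have hkeys : PySem.Set.ofList (((k, v) :: rest).map (fun p => p.1))
        = k :: PySem.Set.ofList (rest'.map (fun p => p.1)) := by
      rw [List.map_cons, PySem.Set.ofList_cons]
      congr 1
      rw [← hsplit, List.map_append]
      exact pv_ofList_run _ _ k (fun a ha => by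
          obtain ⟨p, hp, rfl⟩ := List.mem_map.mp ha; exact hrun p hp)
        (fun hk => by obtain ⟨p, hp, hpk⟩ := List.mem_map.mp hk; exact hrest' p hp hpk)
    -- filters at keys of rest' ignore the head and the run
    have hfilx : ∀ x ∈ PySem.Set.ofList (rest'.map (fun p => p.1)),
        ((k, v) :: rest).filter (fun p => p.1 == x) = rest'.filter (fun p => p.1 == x) := by
      intro x hx
      obtain ⟨p0, hp0, rfl⟩ := List.mem_map.mp ((PySem.Set.mem_ofList _ _).mp hx)
      have hxk : p0.1 ≠ k := hrest' p0 hp0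
      rw [List.filter_cons, if_neg (by simp only [beq_iff_eq]; exact fun he => hxk he.symm),
        ← hsplit, List.filter_append,
        List.filter_eq_nil_iff.mpr (fun p hp => by
          simp only [beq_iff_eq]; exact fun he => hxk (by rw [← he, hrun p hp])),
        List.nil_append]
    -- unfold one step of the grouped scan and compare side by side
    rw [pvGroup, hkeys, List.map_cons, List.filter_cons]
    have hhead : ((( (k, v) :: rest).filter (fun p => p.1 == k)).map (fun p => p.2)).sum
        = v + ((run.map (fun p => p.2)).sum) := by
      rw [hfilk]; simp
    have htail : (PySem.Set.ofList (rest'.map (fun p => p.1))).map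
          (fun x => (x, ((((k, v) :: rest).filter (fun p => p.1 == x)).map (fun p => p.2)).sum))
        = (PySem.Set.ofList (rest'.map (fun p => p.1))).map
          (fun x => (x, ((rest'.filter (fun p => p.1 == x)).map (fun p => p.2)).sum)) :=
      List.map_congr_left (fun x hx => by rw [hfilx x hx])
    simp only [hhead, htail, ← ih hpw_rest']
    split_ifs with hkeep <;> simp [← hrunDef, ← hrest'Def]
theorem sum_all_views_new_eq (new_data : List (String × List (String × Int))) :
    sum_all_views_new new_data = sum_all_views_new_alt new_data := by
  unfold sum_all_views_new sum_all_views_new_alt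
  set flat := pvFlat new_data with hflat
  set D := (PySem.Dict.ofList new_data).values.foldl
      (fun d x => (PySem.Dict.ofList x).items.foldl
        (fun d p => d.insert p.1 (d.getD p.1 0 + p.2)) d) PySem.Dict.empty with hD
  have hDfold : D = ((PySem.Dict.ofList new_data).values.map
        (fun x => (PySem.Dict.ofList x).items)).foldl
      (fun d x => x.foldl (fun d p => d.insert p.1 (d.getD p.1 0 + p.2)) d) PySem.Dict.empty := by
    rw [hD, List.foldl_map]
  have hnd : D.keys.Nodup := by
    rw [hDfold]; exact pv_nodup_keys_outer _ _ (by simp [PySem.Dict.empty])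
  have hkeys : D.keys = PySem.Set.ofList (flat.map (fun p => p.1)) := by
    rw [hDfold, pv_keys_outer, hflat, pvFlat]
    rw [show (PySem.Dict.empty : PySem.Dict String Int).keys = [] from rfl,
      PySem.Set.update_nil_left, List.map_flatten, List.map_map]
  have hval : ∀ k, D.getD k 0 = ((flat.filter (fun p => p.1 == k)).map (fun p => p.2)).sum := by
    intro k
    rw [hDfold, pv_getD_outer, hflat, pvFlat]
    rw [show (PySem.Dict.empty : PySem.Dict String Int).getD k 0 = 0 from rfl, zero_add]
  -- name the sorted key list
  set ks := PySem.List.sorted D.keys (fun k => k) with hks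
  have hksnd : ks.Nodup := ((PySem.List.sorted_perm D.keys (fun k => k) false).nodup_iff).mpr hnd
  have hkslt : ks.Pairwise (· < ·) := by
    have h1 : ks.Pairwise (· ≤ ·) := PySem.List.sorted_pairwise D.keys (fun k => k)
    exact (List.Pairwise.and h1 hksnd).imp (fun h => lt_of_le_of_ne h.1 h.2)
  have hitems : D.items = D.keys.map (fun k => (k, D.getD k 0)) :=
    PySem.Dict.items_eq_map_keys D hnd 0
  -- A's sorted items list is the map over the sorted keys
  have hsorted : PySem.List.sorted D.items (fun p => p.1)
      = ks.map (fun k => (k, D.getD k 0)) := by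
    apply PySem.List.sorted_eq_of_perm_of_pairwise_lt
    · rw [hitems]
      exact (PySem.List.sorted_perm D.keys (fun k => k) false).map _
    · exact (List.pairwise_map).mpr hkslt
  have hndsorted : ((ks.map (fun k => (k, D.getD k 0))).map (fun p => p.1)).Nodup := by
    rw [List.map_map]
    simpa [Function.comp_def] using hksnd
  rw [hsorted, pv_items_ofList _ hndsorted]
  have hfilterNd : (((ks.map (fun k => (k, D.getD k 0))).filter (fun p => pvKeep p.1 p.2)).map
      (fun p => p.1)).Nodup :=
    (List.Sublist.map (fun p : String × Int => p.1)
      (List.filter_sublist (l := ks.map (fun k => (k, D.getD k 0))))).nodup hndsorted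
  rw [pv_items_ofList _ hfilterNd]
  -- B's side: the grouped scan of the sorted flat list
  set S := PySem.List.sorted flat (fun p => p.1) with hS
  have hSpw : S.Pairwise (fun a b => a.1 ≤ b.1) := PySem.List.sorted_pairwise flat (fun p => p.1)
  rw [pv_pvGroup_eq S hSpw]
  have hSperm : S.Perm flat := PySem.List.sorted_perm flat (fun p => p.1) false
  have hsum : ∀ x : String, ((S.filter (fun p => p.1 == x)).map (fun p => p.2)).sum
      = ((flat.filter (fun p => p.1 == x)).map (fun p => p.2)).sum :=
    fun x => ((hSperm.filter _).map _).sum_eq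
  -- B's key list is ks
  have hUnd : (PySem.Set.ofList (S.map (fun p => p.1))).Nodup := PySem.Set.nodup_ofList _
  have hUlt : (PySem.Set.ofList (S.map (fun p => p.1))).Pairwise (· < ·) := by
    have h1 : (PySem.Set.ofList (S.map (fun p => p.1))).Pairwise (· ≤ ·) :=
      pv_pairwise_ofList _ (PySem.List.sorted_map_key_pairwise flat (fun p => p.1))
    exact (List.Pairwise.and h1 hUnd).imp (fun h => lt_of_le_of_ne h.1 h.2)
  have hUperm : (PySem.Set.ofList (S.map (fun p => p.1))).Perm D.keys := by
    rw [List.perm_ext_iff_of_nodup hUnd hnd]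
    intro x
    rw [PySem.Set.mem_ofList, (hSperm.map (fun p => p.1)).mem_iff, hkeys,
      PySem.Set.mem_ofList]
  have hU : ks = PySem.Set.ofList (S.map (fun p => p.1)) :=
    PySem.List.sorted_eq_of_perm_of_pairwise_lt D.keys _ (fun k => k) hUperm
      (by simpa using hUlt)
  rw [← hU]
  -- same map function on both sides
  have hfun : (fun k => (k, D.getD k 0))
      = fun k => (k, ((S.filter (fun p => p.1 == k)).map (fun p => p.2)).sum) := by
    funext k; rw [hval, hsum]
  rw [hfun]

-- ===== VERDICT (by name: the statement is the Claim_ definition above) =====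
theorem sum_all_views_new_spec : Claim_equal_sum_all_views_new := by
  intro new_data _
  unfold Spec_sum_all_views_new
  exact sum_all_views_new_eq new_data
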